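-- pv_equiv track=rewrite | github.com/Sierraki/Solutions | 力扣&Leetcode/算法&algorithm/题库/3606.优惠券校验器.py | validateCoupons
-- ===== SOURCE A (Python) =====
-- from typing import List
--
-- def validateCoupons(
--     code: List[str], businessLine: List[str], isActive: List[bool]
-- ) -> List[str]:
--     # check code
--     def fun(x: str) -> bool:
--         if not x:
--             return False
--         for i in x:
--             if not (i.isalpha() or i.isdigit() or i == "_"):
--                 return False
--         return True
--
--     cnt = {"electronics": [], "grocery": [], "pharmacy": [], "restaurant": []}
--     for i in range(len(code)):
--         if fun(code[i]) and isActive[i] and businessLine[i] in cnt: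
--             cnt[businessLine[i]].append(code[i])
--     ans = []
--     for i in cnt.values():
--         if i != []:
--             ans += sorted(i)
--     return ans
-- ===== SOURCE B (Python) =====
-- def validateCoupons(code, businessLine, isActive):
--     RANK = {"electronics": 0, "grocery": 1, "pharmacy": 2, "restaurant": 3}
--     valid = []
--     for c, bl, act in zip(code, businessLine, isActive):
--         if act and bl in RANK and c and all(
--             ch.isalpha() or ch.isdigit() or ch == "_" for ch in c
--         ):
--             valid.append((RANK[bl], c))
--     valid.sort()
--     return [c for _, c in valid]
-- ===== Notes on version B (the rewrite author's own statement) =====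
-- stated objective: alternative
-- what changed: Replaces the four-bucket dict with four separate sorts and concatenation by one pass appending (rank, code) pairs via an explicit category-rank map, followed by a single composite-key sort and a projection.
-- outside the precondition, e.g. on validateCoupons(['!'], [], []): A returns [], B returns []
import Mathlib
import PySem

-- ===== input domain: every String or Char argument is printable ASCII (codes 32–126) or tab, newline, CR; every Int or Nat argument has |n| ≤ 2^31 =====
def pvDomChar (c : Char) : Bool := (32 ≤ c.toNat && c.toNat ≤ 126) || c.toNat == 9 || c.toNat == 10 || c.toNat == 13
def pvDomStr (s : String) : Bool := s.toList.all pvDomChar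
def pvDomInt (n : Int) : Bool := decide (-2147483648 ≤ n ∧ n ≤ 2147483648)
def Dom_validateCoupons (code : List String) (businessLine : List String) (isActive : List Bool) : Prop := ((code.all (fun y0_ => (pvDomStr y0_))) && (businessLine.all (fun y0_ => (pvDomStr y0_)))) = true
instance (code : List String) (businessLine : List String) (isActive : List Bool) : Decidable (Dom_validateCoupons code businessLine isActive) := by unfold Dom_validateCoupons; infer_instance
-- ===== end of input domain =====

-- B replaces A's four-bucket dict + four separate sorts by one pass collecting (rank, code)
-- pairs and a single composite-key sort (objective: alternative decomposition, same asymptotic cost).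


-- ===== PORT A =====
-- inner helper `fun`: nonempty and every char alnum or '_'
def pyFunCheck (x : String) : Bool :=
  if x.toList.isEmpty then false
  else x.toList.all (fun c => PySem.Chars.isalpha c || PySem.Chars.isdigit c || c == '_')

def validateCoupons (code : List String) (businessLine : List String) (isActive : List Bool) : List String :=
  let cnt0 : PySem.Dict String (List String) :=
    ((((PySem.Dict.empty).insert "electronics" []).insert "grocery" []).insert "pharmacy" []).insert "restaurant" []
  let cnt := (PySem.List.pyRange 0 code.length 1).foldl (fun d i =>
      if pyFunCheck (PySem.List.pyGetD code i "") && (PySem.List.pyGetD isActive i false)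
          && d.contains (PySem.List.pyGetD businessLine i "")
      then d.modify (PySem.List.pyGetD businessLine i "") [] (· ++ [PySem.List.pyGetD code i ""])
      else d) cnt0
  cnt.values.foldl (fun ans l =>
      if l ≠ [] then ans ++ PySem.List.sorted l (fun x => x) false else ans) []

-- ===== PORT B =====
-- Python tuples compare lexicographically, so a (rank, code) tuple is a `Lex (Int × String)`.
def validateCoupons_alt (code : List String) (businessLine : List String) (isActive : List Bool) : List String :=
  let rank : PySem.Dict String Int :=
    ((((PySem.Dict.empty).insert "electronics" 0).insert "grocery" 1).insert "pharmacy" 2).insert "restaurant" 3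
  let valid : List (Lex (Int × String)) :=
    ((code.zip businessLine).zip isActive).foldl (fun acc t =>
      if t.2 && rank.contains t.1.2 && !t.1.1.toList.isEmpty
          && t.1.1.toList.all (fun ch => PySem.Chars.isalpha ch || PySem.Chars.isdigit ch || ch == '_')
      then acc ++ [toLex (rank.getD t.1.2 0, t.1.1)] else acc) []
  (PySem.List.sorted valid (fun x => x) false).map (fun p => (ofLex p).2)

-- ===== PRECONDITION & SPEC =====
-- Pre_ excludes inputs where businessLine or isActive is shorter than code: there A in
-- general raises IndexError (and where the failed code-validation short-circuits every
-- out-of-range access, A returns the same list B does anyway).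
def Pre_validateCoupons (code : List String) (businessLine : List String) (isActive : List Bool) : Prop :=
  code.length ≤ businessLine.length ∧ code.length ≤ isActive.length
instance (code : List String) (businessLine : List String) (isActive : List Bool) : Decidable (Pre_validateCoupons code businessLine isActive) := by unfold Pre_validateCoupons; infer_instance

def pvWitness_validateCoupons : List String × List String × List Bool :=
  (["a_1", "x-y", "b2"], ["grocery", "grocery", "electronics"], [true, true, true])

def Spec_validateCoupons (code : List String) (businessLine : List String) (isActive : List Bool) (out : List String) : Prop := out = validateCoupons_alt code businessLine isActive
instance (code : List String) (businessLine : List String) (isActive : List Bool) (out : List String) : Decidable (Spec_validateCoupons code businessLine isActive out) := by unfold Spec_validateCoupons; infer_instance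

-- ===== CLAIM (what is proved, stated in full; the proofs are below) =====
def Claim_equal_validateCoupons : Prop := ∀ (code : List String) (businessLine : List String) (isActive : List Bool), Dom_validateCoupons code businessLine isActive → Pre_validateCoupons code businessLine isActive → Spec_validateCoupons code businessLine isActive (validateCoupons code businessLine isActive)

-- ===== LEMMAS AND PROOFS =====

def pvKeys : List String := ["electronics", "grocery", "pharmacy", "restaurant"]

-- the common acceptance test, written on a triple
def pvCond (t : (String × String) × Bool) : Bool :=
  pyFunCheck t.1.1 && t.2 && decide (t.1.2 ∈ pvKeys)

def pvRankOf (s : String) : Int :=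
  if s = "electronics" then 0 else if s = "grocery" then 1 else if s = "pharmacy" then 2 else 3

-- codes that land in bucket s, in input order
def pvPicks (l : List ((String × String) × Bool)) (s : String) : List String :=
  (l.filter (fun t => pvCond t && t.1.2 == s)).map (fun t => t.1.1)

-- A's dict-loop step, on a triple
def pvStepA (d : PySem.Dict String (List String)) (t : (String × String) × Bool) : PySem.Dict String (List String) :=
  if pyFunCheck t.1.1 && t.2 && d.contains t.1.2
  then d.modify t.1.2 [] (· ++ [t.1.1]) else d

theorem pv_picks_cons_true (t : (String × String) × Bool) (l : List ((String × String) × Bool))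
    (h : pvCond t = true) (s : String) :
    pvPicks (t :: l) s = if t.1.2 = s then t.1.1 :: pvPicks l s else pvPicks l s := by
  by_cases e : t.1.2 = s <;> simp [pvPicks, h, e]

theorem pv_picks_cons_false (t : (String × String) × Bool) (l : List ((String × String) × Bool))
    (h : pvCond t = false) (s : String) :
    pvPicks (t :: l) s = pvPicks l s := by
  simp [pvPicks, h]

-- index loop over range(len c) with getD-access = loop over the zipped triples (lengths suffice)
theorem pv_foldl_idx_zip {β : Type} (f : β → (String × String) × Bool → β) :
    ∀ (c : List String) (b : List String) (a : List Bool) (init : β),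
      c.length ≤ b.length → c.length ≤ a.length →
      (List.range c.length).foldl
        (fun d k => f d ((c.getD k "", b.getD k ""), a.getD k false)) init
      = ((c.zip b).zip a).foldl f init := by
  intro c
  induction c with
  | nil => intro b a init _ _; simp
  | cons x c ih =>
    intro b a init hb ha
    cases b with
    | nil => simp at hb
    | cons y b =>
      cases a with
      | nil => simp at ha
      | cons z a =>
        simp only [List.length_cons, List.range_succ_eq_map, List.foldl_cons, List.foldl_map,
          List.getD_cons_zero, List.getD_cons_succ, List.zip_cons_cons]
        exact ih b a _ (by simpa using hb) (by simpa using ha)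

-- A's dict loop: keys stay the four fixed keys, and each bucket collects pvPicks
theorem pv_loopA (l : List ((String × String) × Bool)) :
    ∀ (d : PySem.Dict String (List String)), d.keys = pvKeys →
      (l.foldl pvStepA d).keys = pvKeys ∧
      ∀ s, (l.foldl pvStepA d).getD s [] = d.getD s [] ++ pvPicks l s := by
  induction l with
  | nil => intro d hk; exact ⟨hk, fun s => by simp [pvPicks]⟩
  | cons t l ih =>
    intro d hk
    have hcont : ∀ x, d.contains x = decide (x ∈ pvKeys) := by
      intro x; rw [PySem.Dict.contains_eq_decide_mem_keys, hk]
    by_cases hg : (pyFunCheck t.1.1 && t.2 && d.contains t.1.2) = true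
    · have hg' := hg
      simp only [Bool.and_eq_true] at hg'
      have hmem : t.1.2 ∈ pvKeys := by
        have := hg'.2; rw [hcont] at this; simpa using this
      have hc : d.contains t.1.2 = true := hg'.2
      have hstep : pvStepA d t = d.modify t.1.2 [] (· ++ [t.1.1]) := by
        simp [pvStepA, hg]
      have hkeys' : (pvStepA d t).keys = pvKeys := by
        rw [hstep, PySem.Dict.keys_modify, PySem.Dict.keys_insert_of_contains]
        · exact hk
        · exact hc
      obtain ⟨h1, h2⟩ := ih (pvStepA d t) hkeys'
      refine ⟨by simpa [List.foldl_cons] using h1, fun s => ?_⟩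
      have hcond : pvCond t = true := by
        simp only [pvCond, Bool.and_eq_true]
        exact ⟨hg'.1, by simpa using hmem⟩
      have hget : (pvStepA d t).getD s [] =
          if s = t.1.2 then d.getD t.1.2 [] ++ [t.1.1] else d.getD s [] := by
        rw [hstep, PySem.Dict.getD_modify]
      have := h2 s
      simp only [List.foldl_cons] at *
      rw [this, hget, pv_picks_cons_true t l hcond s]
      rcases eq_or_ne s t.1.2 with h | h
      · subst h; simp
      · simp [h, Ne.symm h]
    · have hstep : pvStepA d t = d := by simp [pvStepA, hg]
      obtain ⟨h1, h2⟩ := ih d hk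
      refine ⟨by simpa [List.foldl_cons, hstep] using h1, fun s => ?_⟩
      have hcond : pvCond t = false := by
        rw [Bool.eq_false_iff]
        intro hcc
        apply hg
        simp only [pvCond, Bool.and_eq_true, decide_eq_true_eq] at hcc
        simp only [Bool.and_eq_true]
        exact ⟨hcc.1, by rw [hcont]; simpa using hcc.2⟩
      have := h2 s
      simp only [List.foldl_cons, hstep] at *
      rw [this, pv_picks_cons_false t l hcond s]

-- the bucket decomposition of B's filtered list, as a permutation
theorem pv_perm_buckets (l : List ((String × String) × Bool)) :
    ((l.filter pvCond).map (fun t => toLex (pvRankOf t.1.2, t.1.1))).Perm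
      ((pvPicks l "electronics").map (fun c => toLex ((0 : Int), c)) ++
       (pvPicks l "grocery").map (fun c => toLex ((1 : Int), c)) ++
       (pvPicks l "pharmacy").map (fun c => toLex ((2 : Int), c)) ++
       (pvPicks l "restaurant").map (fun c => toLex ((3 : Int), c))) := by
  induction l with
  | nil => simp [pvPicks]
  | cons t l ih =>
    have hmid : ∀ (a : Lex (Int × String)) (X Y : List (Lex (Int × String))),
        (a :: (X ++ Y)).Perm (X ++ a :: Y) := fun a X Y => List.perm_middle.symm
    by_cases h : pvCond t = true
    · have hmem : t.1.2 ∈ pvKeys := by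
        have := h; simp only [pvCond, Bool.and_eq_true, decide_eq_true_eq] at this
        exact this.2
      simp only [pvKeys, List.mem_cons, List.not_mem_nil, or_false] at hmem
      simp only [List.filter_cons, h, if_true, List.map_cons,
        pv_picks_cons_true t l h]
      rcases hmem with h2 | h2 | h2 | h2 <;> rw [h2] <;>
        simp only [pvRankOf, String.reduceEq, if_true, if_false, List.map_cons] <;>
        refine List.Perm.trans (List.Perm.cons _ ih) ?_ <;>
        simp only [List.cons_append, List.append_assoc]
      · exact List.Perm.refl _
      · exact hmid _ _ _
      · exact (hmid _ _ _).trans (List.Perm.append_left _ (hmid _ _ _))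
      · exact (hmid _ _ _).trans (List.Perm.append_left _
          ((hmid _ _ _).trans (List.Perm.append_left _ (hmid _ _ _))))
    · have h' : pvCond t = false := by simpa using h
      simp only [List.filter_cons, h', pv_picks_cons_false t l h']
      exact ih

def pvRankDict : PySem.Dict String Int :=
  ((((PySem.Dict.empty).insert "electronics" 0).insert "grocery" 1).insert "pharmacy" 2).insert "restaurant" 3

def pvCnt0 : PySem.Dict String (List String) :=
  ((((PySem.Dict.empty).insert "electronics" []).insert "grocery" []).insert "pharmacy" []).insert "restaurant" []

theorem pv_ans_step (ans l : List String) :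
    (if l ≠ [] then ans ++ PySem.List.sorted l (fun x => x) false else ans)
      = ans ++ PySem.List.sorted l (fun x => x) false := by
  cases l with
  | nil =>
    have h : PySem.List.sorted ([] : List String) (fun x => x) false = [] := rfl
    simp [h]
  | cons x l => simp

-- A's result is the four per-bucket sorts, concatenated in key order
theorem pv_A_eq (code businessLine : List String) (isActive : List Bool)
    (h1 : code.length ≤ businessLine.length) (h2 : code.length ≤ isActive.length) :
    validateCoupons code businessLine isActive =
      PySem.List.sorted (pvPicks ((code.zip businessLine).zip isActive) "electronics") (fun x => x) false ++
      PySem.List.sorted (pvPicks ((code.zip businessLine).zip isActive) "grocery") (fun x => x) false ++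
      PySem.List.sorted (pvPicks ((code.zip businessLine).zip isActive) "pharmacy") (fun x => x) false ++
      PySem.List.sorted (pvPicks ((code.zip businessLine).zip isActive) "restaurant") (fun x => x) false := by
  show (((PySem.List.pyRange 0 code.length 1).foldl (fun d i =>
      if pyFunCheck (PySem.List.pyGetD code i "") && (PySem.List.pyGetD isActive i false)
          && d.contains (PySem.List.pyGetD businessLine i "")
      then d.modify (PySem.List.pyGetD businessLine i "") [] (· ++ [PySem.List.pyGetD code i ""])
      else d) pvCnt0).values.foldl (fun ans l =>
        if l ≠ [] then ans ++ PySem.List.sorted l (fun x => x) false else ans) []) = _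
  rw [PySem.List.pyRange_zero_nat, List.foldl_map]
  have hlam : (fun (d : PySem.Dict String (List String)) (k : Nat) =>
      if pyFunCheck (PySem.List.pyGetD code (k : Int) "") && (PySem.List.pyGetD isActive (k : Int) false)
          && d.contains (PySem.List.pyGetD businessLine (k : Int) "")
      then d.modify (PySem.List.pyGetD businessLine (k : Int) "") [] (· ++ [PySem.List.pyGetD code (k : Int) ""])
      else d)
      = (fun d k => pvStepA d ((code.getD k "", businessLine.getD k ""), isActive.getD k false)) := by
    funext d k
    simp only [PySem.List.pyGetD_natCast]
    rfl
  rw [hlam, pv_foldl_idx_zip pvStepA code businessLine isActive pvCnt0 h1 h2]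
  obtain ⟨hK, hG⟩ := pv_loopA ((code.zip businessLine).zip isActive) pvCnt0 (by decide)
  have hnd : ((((code.zip businessLine).zip isActive)).foldl pvStepA pvCnt0).keys.Nodup := by
    rw [hK]; decide
  rw [PySem.Dict.values_eq_map_keys _ hnd []]
  rw [hK]
  have h0 : ∀ s, pvCnt0.getD s [] = [] := by
    intro s
    simp [pvCnt0, PySem.Dict.getD_insert, PySem.Dict.getD_empty]
  simp only [pvKeys, List.map_cons, List.map_nil, hG, h0, List.nil_append]
  simp only [List.foldl_cons, List.foldl_nil, pv_ans_step, List.nil_append, List.append_assoc]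

-- the B-side guard is pvCond
theorem pv_condB_eq (t : (String × String) × Bool) :
    (t.2 && pvRankDict.contains t.1.2 && !t.1.1.toList.isEmpty
      && t.1.1.toList.all (fun ch => PySem.Chars.isalpha ch || PySem.Chars.isdigit ch || ch == '_'))
      = pvCond t := by
  have hc : pvRankDict.contains t.1.2 = decide (t.1.2 ∈ pvKeys) := by
    rw [PySem.Dict.contains_eq_decide_mem_keys]
    rw [show pvRankDict.keys = pvKeys from by decide]
  rw [hc]
  cases hb : t.1.1.toList.isEmpty <;> cases ha : t.2 <;>
    cases hm : decide (t.1.2 ∈ pvKeys) <;>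
    cases hw : t.1.1.toList.all (fun ch => PySem.Chars.isalpha ch || PySem.Chars.isdigit ch || ch == '_') <;>
    simp [pvCond, pyFunCheck, hb, ha, hm, hw]

theorem pv_rank_getD (s : String) (h : s ∈ pvKeys) : pvRankDict.getD s 0 = pvRankOf s := by
  simp only [pvKeys, List.mem_cons, List.not_mem_nil, or_false] at h
  rcases h with h | h | h | h <;> subst h <;> decide

theorem pv_map_ofLex (k : Int) (S : List String) :
    (S.map (fun c => toLex (k, c))).map (fun p : Lex (Int × String) => (ofLex p).2) = S := by
  rw [List.map_map]
  simp [Function.comp_def]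

-- the single composite-key sort splits into the four bucket sorts
theorem pv_sorted_buckets (l : List ((String × String) × Bool)) :
    PySem.List.sorted ((l.filter pvCond).map (fun t => toLex (pvRankOf t.1.2, t.1.1))) (fun x => x) false
      = (PySem.List.sorted (pvPicks l "electronics") (fun x => x) false).map (fun c => toLex ((0 : Int), c)) ++
        (PySem.List.sorted (pvPicks l "grocery") (fun x => x) false).map (fun c => toLex ((1 : Int), c)) ++
        (PySem.List.sorted (pvPicks l "pharmacy") (fun x => x) false).map (fun c => toLex ((2 : Int), c)) ++
        (PySem.List.sorted (pvPicks l "restaurant") (fun x => x) false).map (fun c => toLex ((3 : Int), c)) := by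
  apply PySem.List.sorted_id_eq_of_perm_of_pairwise
  · refine List.Perm.trans ?_ (pv_perm_buckets l).symm
    exact List.Perm.append (List.Perm.append (List.Perm.append
      ((PySem.List.sorted_perm _ _ _).map _) ((PySem.List.sorted_perm _ _ _).map _))
      ((PySem.List.sorted_perm _ _ _).map _)) ((PySem.List.sorted_perm _ _ _).map _)
  · have hblock : ∀ (k : Int) (S : List String),
        List.Pairwise (fun (a b : Lex (Int × String)) => a ≤ b)
          ((PySem.List.sorted S (fun x => x) false).map (fun c => toLex (k, c))) := by
      intro k S
      rw [List.pairwise_map]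
      refine (PySem.List.sorted_pairwise S (fun x => x)).imp ?_
      intro a b hab
      rw [Prod.Lex.le_iff]
      exact Or.inr ⟨rfl, hab⟩
    have hle : ∀ (j k : Int), j < k → ∀ (S T : List String) (a : Lex (Int × String)),
        a ∈ S.map (fun c => toLex (j, c)) → ∀ b ∈ T.map (fun c => toLex (k, c)), a ≤ b := by
      intro j k hjk S T a ha b hb
      obtain ⟨sa, -, rfl⟩ := List.mem_map.1 ha
      obtain ⟨sb, -, rfl⟩ := List.mem_map.1 hb
      rw [Prod.Lex.le_iff]
      exact Or.inl hjk
    rw [List.pairwise_append, List.pairwise_append, List.pairwise_append]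
    refine ⟨⟨⟨hblock 0 _, hblock 1 _, fun a ha b hb => hle 0 1 (by norm_num) _ _ a ha b hb⟩,
      hblock 2 _, fun a ha b hb => ?_⟩, hblock 3 _, fun a ha b hb => ?_⟩
    · rcases List.mem_append.1 ha with h | h
      · exact hle 0 2 (by norm_num) _ _ a h b hb
      · exact hle 1 2 (by norm_num) _ _ a h b hb
    · rcases List.mem_append.1 ha with h | h
      · rcases List.mem_append.1 h with h' | h'
        · exact hle 0 3 (by norm_num) _ _ a h' b hb
        · exact hle 1 3 (by norm_num) _ _ a h' b hb
      · exact hle 2 3 (by norm_num) _ _ a h b hb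

-- B's result is the same concatenation
theorem pv_B_eq (code businessLine : List String) (isActive : List Bool) :
    validateCoupons_alt code businessLine isActive =
      PySem.List.sorted (pvPicks ((code.zip businessLine).zip isActive) "electronics") (fun x => x) false ++
      PySem.List.sorted (pvPicks ((code.zip businessLine).zip isActive) "grocery") (fun x => x) false ++
      PySem.List.sorted (pvPicks ((code.zip businessLine).zip isActive) "pharmacy") (fun x => x) false ++
      PySem.List.sorted (pvPicks ((code.zip businessLine).zip isActive) "restaurant") (fun x => x) false := by
  show (PySem.List.sorted (((code.zip businessLine).zip isActive).foldl (fun acc t =>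
      if t.2 && pvRankDict.contains t.1.2 && !t.1.1.toList.isEmpty
          && t.1.1.toList.all (fun ch => PySem.Chars.isalpha ch || PySem.Chars.isdigit ch || ch == '_')
      then acc ++ [toLex (pvRankDict.getD t.1.2 0, t.1.1)] else acc) []) (fun x => x) false).map
        (fun p => (ofLex p).2) = _
  rw [PySem.List.foldl_append_if
    (fun t : (String × String) × Bool => t.2 && pvRankDict.contains t.1.2 && !t.1.1.toList.isEmpty
      && t.1.1.toList.all (fun ch => PySem.Chars.isalpha ch || PySem.Chars.isdigit ch || ch == '_'))
    (fun t : (String × String) × Bool => toLex (pvRankDict.getD t.1.2 0, t.1.1))]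
  rw [List.nil_append]
  rw [List.filter_congr (fun t _ => pv_condB_eq t)]
  rw [show (((code.zip businessLine).zip isActive).filter pvCond).map
        (fun t => toLex (pvRankDict.getD t.1.2 0, t.1.1))
      = (((code.zip businessLine).zip isActive).filter pvCond).map
        (fun t => toLex (pvRankOf t.1.2, t.1.1)) from ?_]
  · rw [pv_sorted_buckets]
    simp only [List.map_append, pv_map_ofLex]
  · apply List.map_congr_left
    intro t ht
    have hc := List.of_mem_filter ht
    have hm : t.1.2 ∈ pvKeys := by
      simp only [pvCond, Bool.and_eq_true, decide_eq_true_eq] at hc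
      exact hc.2
    rw [pv_rank_getD t.1.2 hm]

-- ===== VERDICT (by name: the statement is the Claim_ definition above) =====
theorem validateCoupons_spec : Claim_equal_validateCoupons := by
  intro code businessLine isActive _ hpre
  unfold Spec_validateCoupons
  rw [pv_A_eq code businessLine isActive hpre.1 hpre.2, pv_B_eq code businessLine isActive]
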